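-- pv_equiv track=rewrite | github.com/nbsimonetti/options-premium-screener | test_keys.py | expand_fstring_keys
-- ===== SOURCE A (Python) =====
-- def expand_fstring_keys(templates: list[str]) -> list[str]:
--     """
--     Expand f-string key templates by substituting known prefixes.
--     e.g., '{key_prefix}_dte' -> ['csp_dte', 'cc_dte']
--     """
--     expanded = []
--     for tmpl in templates:
--         variants = [tmpl]
--         # Expand all known template variables
--         new_variants = []
--         for v in variants:
--             if "{key_prefix}" in v:
--                 new_variants.extend([v.replace("{key_prefix}", p) for p in ["csp", "cc"]])
--             else:
--                 new_variants.append(v)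
--         variants = new_variants
--
--         new_variants = []
--         for v in variants:
--             if "{tab_id}" in v:
--                 new_variants.extend([v.replace("{tab_id}", t) for t in ["csp", "cc"]])
--             else:
--                 new_variants.append(v)
--         variants = new_variants
--
--         new_variants = []
--         for v in variants:
--             if "{detail_key}" in v:
--                 new_variants.extend([v.replace("{detail_key}", d) for d in ["detail_put", "detail_call"]])
--             else:
--                 new_variants.append(v)
--         variants = new_variants
--
--         new_variants = []
--         for v in variants:
--             if "{top_n}" in v:
--                 new_variants.append(v.replace("{top_n}", "25"))
--             else:
--                 new_variants.append(v)
--         variants = new_variants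
--
--         expanded.extend(variants)
--     return expanded
-- ===== SOURCE B (Python) =====
-- RULES = [
--     ("{key_prefix}", ["csp", "cc"]),
--     ("{tab_id}", ["csp", "cc"]),
--     ("{detail_key}", ["detail_put", "detail_call"]),
--     ("{top_n}", ["25"]),
-- ]
--
--
-- def expand_fstring_keys(templates: list[str]) -> list[str]:
--     def expand(s, rules):
--         if not rules:
--             return [s]
--         ph, opts = rules[0]
--         rest = rules[1:]
--         if ph not in s:
--             return expand(s, rest)
--         return [r for o in opts for r in expand(s.replace(ph, o), rest)]
--
--     return [r for t in templates for r in expand(t, RULES)]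
-- ===== Notes on version B (the rewrite author's own statement) =====
-- stated objective: simpler
-- what changed: Replaced four unrolled breadth-first passes that rebuild a variants list per placeholder with a single (placeholder, options) rules table and one depth-first recursion over the rules per template.
import Mathlib
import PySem

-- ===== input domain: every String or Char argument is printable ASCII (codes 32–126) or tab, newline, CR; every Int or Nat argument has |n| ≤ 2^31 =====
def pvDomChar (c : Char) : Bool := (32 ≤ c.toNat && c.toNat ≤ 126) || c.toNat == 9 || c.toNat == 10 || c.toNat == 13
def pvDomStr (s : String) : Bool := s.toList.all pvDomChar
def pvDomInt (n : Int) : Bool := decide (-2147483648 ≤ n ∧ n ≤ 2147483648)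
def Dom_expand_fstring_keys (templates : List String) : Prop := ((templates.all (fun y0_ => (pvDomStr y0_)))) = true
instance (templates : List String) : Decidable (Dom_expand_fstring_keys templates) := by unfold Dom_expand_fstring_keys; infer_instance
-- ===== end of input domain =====

-- B replaces A's four unrolled breadth-first passes by a rules table and one depth-first
-- recursion per template (objective: simpler); same return value on every input.

-- ===== PORT A =====
-- one of A's identical 'new_variants' pass loops (extend/append over the variants list)
def pvPassA (ph : String) (opts : List String) (variants : List String) : List String :=
  variants.foldl (fun nv v =>
    if PySem.Str.isIn ph v then nv ++ opts.map (fun p => PySem.Str.replace v ph p)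
    else nv ++ [v]) []

def expand_fstring_keys (templates : List String) : List String :=
  templates.foldl (fun expanded tmpl =>
    let variants := [tmpl]
    let variants := pvPassA "{key_prefix}" ["csp", "cc"] variants
    let variants := pvPassA "{tab_id}" ["csp", "cc"] variants
    let variants := pvPassA "{detail_key}" ["detail_put", "detail_call"] variants
    -- fourth pass: single replacement appended (Python appends v.replace("{top_n}","25"))
    let variants := variants.foldl (fun nv v =>
      if PySem.Str.isIn "{top_n}" v then nv ++ [PySem.Str.replace v "{top_n}" "25"]
      else nv ++ [v]) []
    expanded ++ variants) []

-- ===== PORT B =====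
def pvRules : List (String × List String) :=
  [("{key_prefix}", ["csp", "cc"]),
   ("{tab_id}", ["csp", "cc"]),
   ("{detail_key}", ["detail_put", "detail_call"]),
   ("{top_n}", ["25"])]

-- B's 'expand(s, rules)': depth-first recursion over the rules list
def pvExpand : List (String × List String) → String → List String
  | [], s => [s]
  | (ph, opts) :: rest, s =>
      if !(PySem.Str.isIn ph s) then pvExpand rest s
      else opts.flatMap (fun o => pvExpand rest (PySem.Str.replace s ph o))

def expand_fstring_keys_alt (templates : List String) : List String :=
  templates.flatMap (fun t => pvExpand pvRules t)

-- ===== PRECONDITION & SPEC =====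
def Spec_expand_fstring_keys (templates : List String) (out : List String) : Prop := out = expand_fstring_keys_alt templates
instance (templates : List String) (out : List String) : Decidable (Spec_expand_fstring_keys templates out) := by unfold Spec_expand_fstring_keys; infer_instance

-- ===== CLAIM (what is proved, stated in full; the proofs are below) =====
def Claim_equal_expand_fstring_keys : Prop := ∀ (templates : List String), Dom_expand_fstring_keys templates → Spec_expand_fstring_keys templates (expand_fstring_keys templates)

-- ===== LEMMAS AND PROOFS =====

-- one variant's contribution in a pass of A
def pvStep (ph : String) (opts : List String) (v : String) : List String :=
  if PySem.Str.isIn ph v then opts.map (fun p => PySem.Str.replace v ph p) else [v]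

lemma foldl_append_step {α β : Type} (g : α → List β) :
    ∀ (L : List α) (acc : List β),
      L.foldl (fun nv v => nv ++ g v) acc = acc ++ L.flatMap g := by
  intro L
  induction L with
  | nil => simp
  | cons x xs ih => intro acc; simp [List.foldl_cons, ih, List.flatMap_cons]

lemma passA_eq_flatMap (ph : String) (opts : List String) (L : List String) :
    pvPassA ph opts L = L.flatMap (pvStep ph opts) := by
  unfold pvPassA
  have h : (fun nv v =>
      if PySem.Str.isIn ph v then nv ++ opts.map (fun p => PySem.Str.replace v ph p)
      else nv ++ [v]) = fun nv v => nv ++ pvStep ph opts v := by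
    funext nv v; unfold pvStep; split <;> rfl
  rw [h, foldl_append_step]; simp

-- peeling one rule off pvExpand equals one pvStep followed by the rest
lemma step_flatMap (ph : String) (opts : List String) (rest : List (String × List String)) (s : String) :
    (pvStep ph opts s).flatMap (pvExpand rest) = pvExpand ((ph, opts) :: rest) s := by
  unfold pvStep pvExpand
  by_cases h : PySem.Chars.isIn ph.toList s.toList = true
  · simp [PySem.Str.isIn, h, List.flatMap_map]
  · simp [PySem.Str.isIn, h]

lemma flatMap_pass (ph : String) (opts : List String) (rest : List (String × List String))
    (L : List String) :
    (L.flatMap (pvStep ph opts)).flatMap (pvExpand rest) = L.flatMap (pvExpand ((ph, opts) :: rest)) := by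
  rw [List.flatMap_assoc]
  exact List.flatMap_congr (fun s _ => step_flatMap ph opts rest s)

-- ===== VERDICT (by name: the statement is the Claim_ definition above) =====
theorem expand_fstring_keys_spec : Claim_equal_expand_fstring_keys := by
  intro templates _
  unfold Spec_expand_fstring_keys expand_fstring_keys expand_fstring_keys_alt
  have body : ∀ tmpl : String,
      (let variants := [tmpl]
       let variants := pvPassA "{key_prefix}" ["csp", "cc"] variants
       let variants := pvPassA "{tab_id}" ["csp", "cc"] variants
       let variants := pvPassA "{detail_key}" ["detail_put", "detail_call"] variants
       let variants := variants.foldl (fun nv v =>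
         if PySem.Str.isIn "{top_n}" v then nv ++ [PySem.Str.replace v "{top_n}" "25"]
         else nv ++ [v]) []
       variants) = pvExpand pvRules tmpl := by
    intro tmpl
    show (pvPassA "{detail_key}" ["detail_put", "detail_call"]
        (pvPassA "{tab_id}" ["csp", "cc"] (pvPassA "{key_prefix}" ["csp", "cc"] [tmpl]))).foldl
        (fun nv v =>
          if PySem.Str.isIn "{top_n}" v then nv ++ [PySem.Str.replace v "{top_n}" "25"]
          else nv ++ [v]) [] = pvExpand pvRules tmpl
    have h4 : (fun (nv : List String) (v : String) =>
        if PySem.Str.isIn "{top_n}" v then nv ++ [PySem.Str.replace v "{top_n}" "25"]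
        else nv ++ [v]) = fun nv v => nv ++ pvStep "{top_n}" ["25"] v := by
      funext nv v; unfold pvStep; split <;> rfl
    rw [h4, foldl_append_step, passA_eq_flatMap, passA_eq_flatMap, passA_eq_flatMap]
    simp only [List.nil_append]
    have e4 : ∀ L : List String, L.flatMap (pvStep "{top_n}" ["25"]) =
        L.flatMap (pvExpand [("{top_n}", ["25"])]) := by
      intro L
      refine List.flatMap_congr (fun s _ => ?_)
      have := step_flatMap "{top_n}" ["25"] [] s
      simpa [pvExpand] using this
    rw [e4, flatMap_pass, flatMap_pass, flatMap_pass]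
    simp [pvRules]
  have := foldl_append_step (fun tmpl => pvExpand pvRules tmpl) templates []
  calc templates.foldl _ [] = templates.flatMap (fun tmpl => pvExpand pvRules tmpl) := by
        simp only [body] at *
        simpa using this
    _ = _ := rfl
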